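-- pv_equiv track=rewrite | github.com/ooni/data | oonidata/dataclient.py | get_file_entry_ext
-- ===== SOURCE A (Python) =====
-- def get_file_entry_ext(filename: str):
--     supported_extensions = [
--         # New jsonl gzips
--         "jsonl.gz",
--         # Old json gzips
--         "json.gz",
--         # New postcans
--         "tar.gz",
--         # Old cans
--         "tar.lz4",
--         "json.lz4",
--         "yaml.lz4",
--     ]
--     for ext in supported_extensions:
--         if filename.endswith("." + ext):
--             return ext
--     return filename.split(".")[-1]
-- ===== SOURCE B (Python) =====
-- _SUPPORTED = {"jsonl.gz", "json.gz", "tar.gz", "tar.lz4", "json.lz4", "yaml.lz4"}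
--
--
-- def get_file_entry_ext(filename: str):
--     parts = filename.split(".")
--     suffix = ".".join(parts[-2:])
--     if len(parts) >= 3 and suffix in _SUPPORTED:
--         return suffix
--     return parts[-1]
-- ===== Notes on version B (the rewrite author's own statement) =====
-- stated objective: simpler
-- what changed: B splits the filename on dots once and tests the joined last-two components for membership in a precomputed set (with a len(parts)>=3 guard), instead of A's loop of six endswith scans; the fallback is the already-computed last part.
import Mathlib
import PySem

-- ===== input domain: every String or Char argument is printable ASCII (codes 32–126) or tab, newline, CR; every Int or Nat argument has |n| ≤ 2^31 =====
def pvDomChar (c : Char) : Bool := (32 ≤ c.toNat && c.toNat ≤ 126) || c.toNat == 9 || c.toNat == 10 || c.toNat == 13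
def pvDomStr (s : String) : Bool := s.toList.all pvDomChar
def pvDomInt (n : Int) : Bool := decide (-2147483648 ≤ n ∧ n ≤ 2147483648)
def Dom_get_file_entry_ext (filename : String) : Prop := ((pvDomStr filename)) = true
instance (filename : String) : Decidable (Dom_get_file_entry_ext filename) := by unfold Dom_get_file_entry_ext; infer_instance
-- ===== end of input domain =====

-- B replaces A's six-fold endswith loop by one split and a set membership test on the joined last two parts (objective: simpler).

-- ===== PORT A =====
-- the module-level list of supported extensions, in A's order
def pvSupportedA : List (List Char) :=
  ["jsonl.gz".toList, "json.gz".toList, "tar.gz".toList,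
   "tar.lz4".toList, "json.lz4".toList, "yaml.lz4".toList]

def get_file_entry_ext (filename : String) : String :=
  -- the for-loop with early return is List.find? over the same list, in order
  match pvSupportedA.find? (fun ext => PySem.Chars.endswith filename.toList ('.' :: ext)) with
  | some ext => String.mk ext
  | none =>
      -- filename.split(".")[-1]; split(".") is never empty, so Python's [-1] never raises
      String.mk ((PySem.List.pyGet? (PySem.Chars.splitOn filename.toList ['.']) (-1)).getD [])

-- ===== PORT B =====
-- B's module-level set _SUPPORTED (distinct elements)
def pvSupportedB : List (List Char) :=
  ["jsonl.gz".toList, "json.gz".toList, "tar.gz".toList,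
   "tar.lz4".toList, "json.lz4".toList, "yaml.lz4".toList]

def get_file_entry_ext_alt (filename : String) : String :=
  let parts := PySem.Chars.splitOn filename.toList ['.']
  let suffix := PySem.Chars.join ['.'] (PySem.List.slice parts (some (-2)) none)
  if 3 ≤ parts.length && pvSupportedB.contains suffix then String.mk suffix
  else String.mk ((PySem.List.pyGet? parts (-1)).getD [])

-- ===== PRECONDITION & SPEC =====
def Spec_get_file_entry_ext (filename : String) (out : String) : Prop := out = get_file_entry_ext_alt filename
instance (filename : String) (out : String) : Decidable (Spec_get_file_entry_ext filename out) := by unfold Spec_get_file_entry_ext; infer_instance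

-- ===== CLAIM (what is proved, stated in full; the proofs are below) =====
def Claim_equal_get_file_entry_ext : Prop := ∀ (filename : String), Dom_get_file_entry_ext filename → Spec_get_file_entry_ext filename (get_file_entry_ext filename)

-- ===== LEMMAS AND PROOFS =====

-- clean structural model of split-on-'.': (first segment, remaining segments)
def splitD : List Char → List Char × List (List Char)
  | [] => ([], [])
  | c :: rest =>
      let p := splitD rest
      if c = '.' then ([], p.1 :: p.2) else (c :: p.1, p.2)

theorem splitOn_go_spec (fuel : Nat) : ∀ (l cur acc : _), l.length < fuel →
    PySem.Chars.splitOn.go ['.'] fuel l cur acc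
      = acc.reverse ++ (cur.reverse ++ (splitD l).1) :: (splitD l).2 := by
  induction fuel with
  | zero => intro l cur acc h; omega
  | succ f ih =>
      intro l cur acc h
      cases l with
      | nil => simp [PySem.Chars.splitOn.go, splitD]
      | cons c rest =>
          by_cases hc : c = '.'
          · subst hc
            rw [PySem.Chars.splitOn.go]
            simp only [List.isPrefixOf, BEq.rfl, Bool.true_and, if_true,
              List.length_cons, List.length_nil, List.drop_succ_cons, List.drop_zero]
            rw [ih rest [] _ (by simpa using Nat.lt_of_succ_lt_succ h)]
            simp [splitD]
          · rw [PySem.Chars.splitOn.go]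
            have hpre : List.isPrefixOf ['.'] (c :: rest) = false := by
              simp [List.isPrefixOf]; exact fun hcc => (hc hcc.symm).elim
            rw [hpre]
            simp only [Bool.false_eq_true, if_false]
            rw [ih rest (c :: cur) acc (by simpa using Nat.lt_of_succ_lt_succ h)]
            simp [splitD, hc]

theorem splitOn_eq_splitD (cs : List Char) :
    PySem.Chars.splitOn cs ['.'] = (splitD cs).1 :: (splitD cs).2 := by
  unfold PySem.Chars.splitOn
  rw [splitOn_go_spec (cs.length + 1) cs [] [] (by omega)]
  simp

theorem splitD_append (zs ys : List Char) :
    splitD (zs ++ '.' :: ys) = ((splitD zs).1, (splitD zs).2 ++ (splitD ys).1 :: (splitD ys).2) := by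
  induction zs with
  | nil => simp [splitD]
  | cons c zs ih =>
      by_cases hc : c = '.'
      · subst hc; simp [splitD, ih]
      · simp [splitD, hc, ih]

theorem splitD_no_dot (ys : List Char) (h : '.' ∉ ys) : splitD ys = (ys, []) := by
  induction ys with
  | nil => rfl
  | cons c rest ih =>
      have hc : c ≠ '.' := fun hcc => h (hcc ▸ List.mem_cons_self)
      simp [splitD, hc, ih (fun hm => h (List.mem_cons_of_mem _ hm))]

theorem join_splitD (cs : List Char) :
    PySem.Chars.join ['.'] ((splitD cs).1 :: (splitD cs).2) = cs := by
  induction cs with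
  | nil => rfl
  | cons c rest ih =>
      by_cases hc : c = '.'
      · subst hc
        simp only [splitD, if_true]
        rw [PySem.Chars.join_cons_cons]
        simp [ih]
      · simp only [splitD]
        rw [if_neg hc]
        cases hs : (splitD rest).2 with
        | nil =>
            rw [hs] at ih
            rw [PySem.Chars.join_singleton] at ih ⊢
            simp [ih]
        | cons q t =>
            rw [hs] at ih
            rw [PySem.Chars.join_cons_cons] at ih ⊢
            simp [ih]

-- '.'.join over a list ending in exactly two segments, with a nonempty prefix
theorem join_last2 (init : List (List Char)) (e1 e2 : List Char) (h : init ≠ []) :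
    PySem.Chars.join ['.'] (init ++ [e1, e2])
      = PySem.Chars.join ['.'] init ++ '.' :: (e1 ++ '.' :: e2) := by
  induction init with
  | nil => exact absurd rfl h
  | cons a t ih =>
      cases t with
      | nil =>
          rw [List.cons_append, List.nil_append, PySem.Chars.join_cons_cons,
              PySem.Chars.join_cons_cons, PySem.Chars.join_singleton, PySem.Chars.join_singleton]
          simp
      | cons b t' =>
          simp only [List.cons_append]
          rw [PySem.Chars.join_cons_cons, PySem.Chars.join_cons_cons,
              show b :: (t' ++ [e1, e2]) = (b :: t') ++ [e1, e2] by simp,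
              ih (by simp)]
          simp

theorem slice_neg2_last (l : List (List Char)) (a b : List Char) :
    PySem.List.slice (l ++ [a, b]) (some (-2)) none = [a, b] := by
  simp [PySem.List.slice]

-- every supported extension is dot-free ++ '.' ++ dot-free
theorem supported_decomp (ext : List Char) (h : ext ∈ pvSupportedA) :
    ∃ e1 e2, ext = e1 ++ '.' :: e2 ∧ '.' ∉ e1 ∧ '.' ∉ e2 := by
  simp only [pvSupportedA, List.mem_cons, List.not_mem_nil, or_false] at h
  rcases h with h | h | h | h | h | h <;> subst h
  · exact ⟨"jsonl".toList, "gz".toList, by decide, by decide, by decide⟩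
  · exact ⟨"json".toList, "gz".toList, by decide, by decide, by decide⟩
  · exact ⟨"tar".toList, "gz".toList, by decide, by decide, by decide⟩
  · exact ⟨"tar".toList, "lz4".toList, by decide, by decide, by decide⟩
  · exact ⟨"json".toList, "lz4".toList, by decide, by decide, by decide⟩
  · exact ⟨"yaml".toList, "lz4".toList, by decide, by decide, by decide⟩

-- a list of length ≥ 3 is a nonempty prefix plus its last two elements
theorem exists_last2 {α : Type} (l : List α) (h : 3 ≤ l.length) :
    ∃ init a b, l = init ++ [a, b] ∧ init ≠ [] := by
  rcases hr : l.reverse with _ | ⟨a, _ | ⟨b, t⟩⟩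
  · have h0 : l.length = 0 := by simpa using congrArg List.length hr
    omega
  · have h0 : l.length = 1 := by simpa using congrArg List.length hr
    omega
  · refine ⟨t.reverse, b, a, ?_, ?_⟩
    · have hl : l = l.reverse.reverse := by simp
      rw [hl, hr]; simp
    · intro ht
      have ht' : t = [] := by simpa using congrArg List.reverse ht
      rw [ht'] at hr
      have h2 : l.length = 2 := by simpa using congrArg List.length hr
      omega

-- key characterisation: the splitD shape of a name that ends in ".e1.e2" (e1,e2 dot-free)
theorem splitD_of_endswith (cs zs e1 e2 : List Char) (h1 : '.' ∉ e1) (h2 : '.' ∉ e2)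
    (hcs : zs ++ '.' :: (e1 ++ '.' :: e2) = cs) :
    splitD cs = ((splitD zs).1, (splitD zs).2 ++ [e1, e2]) := by
  rw [← hcs, splitD_append, splitD_append, splitD_no_dot e1 h1, splitD_no_dot e2 h2]
  simp

theorem get_file_entry_ext_eq_alt (filename : String) :
    get_file_entry_ext filename = get_file_entry_ext_alt filename := by
  simp only [get_file_entry_ext, get_file_entry_ext_alt]
  rw [splitOn_eq_splitD]
  cases hf : pvSupportedA.find? (fun ext => PySem.Chars.endswith filename.toList ('.' :: ext)) with
  | none =>
      rw [if_neg]
      intro hcond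
      simp only [Bool.and_eq_true, decide_eq_true_eq, List.contains_iff_mem] at hcond
      obtain ⟨hlen, hmem⟩ := hcond
      obtain ⟨init, a, b, hl, hinit⟩ := exists_last2 _ hlen
      -- the suffix computed by B is a ++ '.' :: b
      have hsl : PySem.List.slice ((splitD filename.toList).1 :: (splitD filename.toList).2)
          (some (-2)) none = [a, b] := by rw [hl]; exact slice_neg2_last init a b
      rw [hsl] at hmem
      have hsuf : PySem.Chars.join ['.'] [a, b] = a ++ '.' :: b := by
        rw [PySem.Chars.join_cons_cons, PySem.Chars.join_singleton]; simp
      rw [hsuf] at hmem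
      -- so filename ends with "." ++ that member, contradicting find? = none
      have hjoin := join_splitD filename.toList
      rw [hl, join_last2 init a b hinit] at hjoin
      have hend : PySem.Chars.endswith filename.toList ('.' :: (a ++ '.' :: b)) = true := by
        rw [PySem.Chars.endswith_iff]
        exact ⟨PySem.Chars.join ['.'] init, hjoin⟩
      have hAB : pvSupportedA = pvSupportedB := rfl
      have := List.find?_eq_none.mp hf (a ++ '.' :: b) (by rw [hAB]; exact hmem)
      simp [hend] at this
  | some ext =>
      have hmem := List.mem_of_find?_eq_some hf
      have hp := List.find?_some hf
      obtain ⟨e1, e2, hext, h1, h2⟩ := supported_decomp ext hmem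
      rw [hext] at hp
      rw [PySem.Chars.endswith_iff] at hp
      obtain ⟨zs, hzs⟩ := hp
      have hsd := splitD_of_endswith filename.toList zs e1 e2 h1 h2 hzs
      have hshape : (splitD filename.toList).1 :: (splitD filename.toList).2
          = ((splitD zs).1 :: (splitD zs).2) ++ [e1, e2] := by rw [hsd]; simp
      have hsuf : PySem.Chars.join ['.']
          (PySem.List.slice ((splitD filename.toList).1 :: (splitD filename.toList).2)
            (some (-2)) none) = ext := by
        rw [hshape, slice_neg2_last, PySem.Chars.join_cons_cons, PySem.Chars.join_singleton, hext]
        simp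
      have hlen3 : 3 ≤ ((splitD filename.toList).1 :: (splitD filename.toList).2).length := by
        rw [hshape]; simp
      have hcond : (decide (3 ≤ ((splitD filename.toList).1 :: (splitD filename.toList).2).length)
          && pvSupportedB.contains (PySem.Chars.join ['.']
            (PySem.List.slice ((splitD filename.toList).1 :: (splitD filename.toList).2)
              (some (-2)) none))) = true := by
        simp only [Bool.and_eq_true, decide_eq_true_eq, List.contains_iff_mem, hsuf]
        exact ⟨hlen3, by rw [show pvSupportedB = pvSupportedA from rfl]; exact hmem⟩
      rw [if_pos hcond]
      rw [hsuf]

-- ===== VERDICT (by name: the statement is the Claim_ definition above) =====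
theorem get_file_entry_ext_spec : Claim_equal_get_file_entry_ext := by
  intro filename _
  exact get_file_entry_ext_eq_alt filename
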